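-- pv_equiv track=rewrite | github.com/ankitk28/CS412Project | ngramMining.py | generate_seqmining_dataset
-- ===== SOURCE A (Python) =====
-- def generate_seqmining_dataset(patterns):
--     """This function generates a sequence database to mine n-grams from.
--
--     Parameters
--     ----------
--     patterns : List of Textual Patterns
--
--     Returns
--     -------
--     type List of Sequences
--
--     """
--     smining_dataset = []
--     for pattern in patterns:
--         words = pattern.split(" ")
--         temp = []
--         for word in words:
--             if word.startswith("CHEMICAL_") or word.startswith("DISEASE_") or word.startswith("GENE_"):
--                 if len(temp) != 0:
--                     temp = ' '.join(temp)
--                     smining_dataset.append(temp)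
--                     temp = []
--             else:
--                 temp.append(word)
--     return smining_dataset
-- ===== SOURCE B (Python) =====
-- def _is_marker(word):
--     return word.startswith(("CHEMICAL_", "DISEASE_", "GENE_"))
--
--
-- def _segments(tokens):
--     """Segments of non-marker tokens that are followed by a marker, via
--     recursion on the first marker position."""
--     for i, w in enumerate(tokens):
--         if _is_marker(w):
--             rest = _segments(tokens[i + 1:])
--             return ([" ".join(tokens[:i])] if i else []) + rest
--     return []
--
--
-- def generate_seqmining_dataset(patterns):
--     out = []
--     for pattern in patterns:
--         out.extend(_segments(pattern.split(" ")))
--     return out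
-- ===== Notes on version B (the rewrite author's own statement) =====
-- stated objective: alternative
-- what changed: A streams each pattern through a flush-on-marker accumulator loop; B instead recursively peels the pattern at its first marker token (find first marker index, emit the leading run if nonempty, recurse on the tail), concatenating per-pattern segment lists.
import Mathlib
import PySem

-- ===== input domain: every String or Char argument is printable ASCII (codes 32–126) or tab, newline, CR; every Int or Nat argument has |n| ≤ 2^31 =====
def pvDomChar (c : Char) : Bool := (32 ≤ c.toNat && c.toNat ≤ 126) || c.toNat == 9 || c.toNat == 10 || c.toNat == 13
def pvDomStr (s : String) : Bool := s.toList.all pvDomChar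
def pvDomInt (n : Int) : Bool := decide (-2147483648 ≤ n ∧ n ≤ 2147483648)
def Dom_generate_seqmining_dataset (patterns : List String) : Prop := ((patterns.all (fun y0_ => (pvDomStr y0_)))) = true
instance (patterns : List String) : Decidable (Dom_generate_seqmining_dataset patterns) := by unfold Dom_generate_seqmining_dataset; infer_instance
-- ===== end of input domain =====

-- B replaces A's flush-on-marker accumulator loop by recursion on the first marker position (objective: alternative decomposition, same cost).

-- ===== PORT A =====
-- pattern.split(" "): sep is the literal nonempty " ", so split? is always some; getD is only a totality guard
def generate_seqmining_dataset (patterns : List String) : List String :=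
  (patterns.foldl (fun (smining_dataset : List String) pattern =>
    let words := (PySem.Str.split? pattern " ").getD []
    (words.foldl (fun (s : List String × List String) word =>
      if PySem.Str.startswith word "CHEMICAL_" || PySem.Str.startswith word "DISEASE_"
          || PySem.Str.startswith word "GENE_" then
        if s.2.length ≠ 0 then (s.1 ++ [PySem.Str.join " " s.2], [])
        else s
      else (s.1, s.2 ++ [word])) (smining_dataset, [])).1) [])

-- ===== PORT B =====
-- word.startswith(("CHEMICAL_", "DISEASE_", "GENE_")): the tuple form is the disjunction of the three prefixes
def pvIsMarker (word : String) : Bool :=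
  PySem.Str.startswith word "CHEMICAL_" || PySem.Str.startswith word "DISEASE_"
    || PySem.Str.startswith word "GENE_"

-- _segments: the enumerate-loop returning at the first marker = findIdx?;
-- tokens[:i] / tokens[i+1:] with i ≥ 0 (from enumerate) are exactly take i / drop (i+1)
def pvSegments (tokens : List String) : List String :=
  match h : tokens.findIdx? pvIsMarker with
  | none => []
  | some i =>
      (if i ≠ 0 then [PySem.Str.join " " (tokens.take i)] else []) ++
        pvSegments (tokens.drop (i + 1))
termination_by tokens.length
decreasing_by
  cases tokens with
  | nil => simp [List.findIdx?, List.findIdx?.go] at h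
  | cons a l => simp [List.length_drop]

def generate_seqmining_dataset_alt (patterns : List String) : List String :=
  patterns.foldl
    (fun out pattern => out ++ pvSegments ((PySem.Str.split? pattern " ").getD [])) []

-- ===== PRECONDITION & SPEC =====
def Spec_generate_seqmining_dataset (patterns : List String) (out : List String) : Prop := out = generate_seqmining_dataset_alt patterns
instance (patterns : List String) (out : List String) : Decidable (Spec_generate_seqmining_dataset patterns out) := by unfold Spec_generate_seqmining_dataset; infer_instance

-- ===== CLAIM (what is proved, stated in full; the proofs are below) =====
def Claim_equal_generate_seqmining_dataset : Prop := ∀ (patterns : List String), Dom_generate_seqmining_dataset patterns → Spec_generate_seqmining_dataset patterns (generate_seqmining_dataset patterns)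

-- ===== LEMMAS AND PROOFS =====

-- A's inner loop body, named for the proofs
def pvStepA (s : List String × List String) (word : String) : List String × List String :=
  if PySem.Str.startswith word "CHEMICAL_" || PySem.Str.startswith word "DISEASE_"
      || PySem.Str.startswith word "GENE_" then
    if s.2.length ≠ 0 then (s.1 ++ [PySem.Str.join " " s.2], [])
    else s
  else (s.1, s.2 ++ [word])

theorem pvSegments_of_no_marker (ts : List String)
    (h : ∀ w ∈ ts, pvIsMarker w = false) : pvSegments ts = [] := by
  have hnone : ts.findIdx? pvIsMarker = none := List.findIdx?_eq_none_iff.2 h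
  unfold pvSegments
  split
  · rfl
  · rename_i i hsome; rw [hnone] at hsome; cases hsome

theorem pvSegments_flush (temp : List String) (w : String) (ws : List String)
    (htemp : ∀ x ∈ temp, pvIsMarker x = false) (hw : pvIsMarker w = true) :
    pvSegments (temp ++ w :: ws)
      = (if temp.length ≠ 0 then [PySem.Str.join " " temp] else []) ++ pvSegments ws := by
  have hidx : (temp ++ w :: ws).findIdx? pvIsMarker = some temp.length := by
    induction temp with
    | nil => simp [List.findIdx?_cons, hw]
    | cons a l ih =>
        have ha : pvIsMarker a = false := htemp a (by simp)
        have ih' := ih (fun x hx => htemp x (by simp [hx]))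
        simp [List.findIdx?_cons, ha, ih']
  have htake : (temp ++ w :: ws).take temp.length = temp := List.take_left
  have hdrop : (temp ++ w :: ws).drop (temp.length + 1) = ws := by
    rw [show temp ++ w :: ws = (temp ++ [w]) ++ ws by simp,
        show temp.length + 1 = (temp ++ [w]).length by simp,
        List.drop_left]
  rw [pvSegments.eq_def]
  split
  · rename_i hnone; rw [hidx] at hnone; cases hnone
  · rename_i i hsome
    rw [hidx] at hsome
    injection hsome with hi
    subst hi
    rw [htake, hdrop]

theorem pvInner_invariant (ws : List String) (ds temp : List String)
    (htemp : ∀ x ∈ temp, pvIsMarker x = false) :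
    (ws.foldl pvStepA (ds, temp)).1 = ds ++ pvSegments (temp ++ ws) := by
  induction ws generalizing ds temp with
  | nil =>
      simp [pvSegments_of_no_marker temp htemp]
  | cons w ws ih =>
      rw [List.foldl_cons]
      by_cases hw : pvIsMarker w = true
      · have hc : (PySem.Str.startswith w "CHEMICAL_" || PySem.Str.startswith w "DISEASE_"
            || PySem.Str.startswith w "GENE_") = true := hw
        rw [pvSegments_flush temp w ws htemp hw]
        by_cases h0 : temp = []
        · subst h0
          have hstep : pvStepA (ds, []) w = (ds, []) := by
            unfold pvStepA; rw [if_pos hc, if_neg (by simp)]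
          rw [hstep, ih ds [] (by simp)]
          simp
        · have hstep : pvStepA (ds, temp) w = (ds ++ [PySem.Str.join " " temp], []) := by
            unfold pvStepA
            rw [if_pos hc, if_pos (by simp [List.length_eq_zero_iff, h0])]
          rw [hstep, ih (ds ++ [PySem.Str.join " " temp]) [] (by simp)]
          simp [h0]
      · have hw' : pvIsMarker w = false := (Bool.not_eq_true _) ▸ hw
        have hc : (PySem.Str.startswith w "CHEMICAL_" || PySem.Str.startswith w "DISEASE_"
            || PySem.Str.startswith w "GENE_") = false := hw'
        have hstep : pvStepA (ds, temp) w = (ds, temp ++ [w]) := by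
          unfold pvStepA; rw [if_neg (by rw [hc]; simp)]
        have htemp' : ∀ x ∈ temp ++ [w], pvIsMarker x = false := by
          intro x hx
          rcases List.mem_append.1 hx with h | h
          · exact htemp x h
          · simp at h; subst h; exact hw'
        rw [hstep, ih ds (temp ++ [w]) htemp']
        simp

theorem pvMain (patterns : List String) :
    generate_seqmining_dataset patterns = generate_seqmining_dataset_alt patterns := by
  unfold generate_seqmining_dataset generate_seqmining_dataset_alt
  induction patterns using List.reverseRecOn with
  | nil => rfl
  | append_singleton ps p ih =>
      rw [List.foldl_append, List.foldl_append, ← ih, List.foldl_cons, List.foldl_nil,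
          List.foldl_cons, List.foldl_nil]
      exact pvInner_invariant ((PySem.Str.split? p " ").getD []) _ [] (by simp)

-- ===== VERDICT (by name: the statement is the Claim_ definition above) =====
theorem generate_seqmining_dataset_spec : Claim_equal_generate_seqmining_dataset := by
  intro patterns _
  exact pvMain patterns
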